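-- pv_equiv track=rewrite | github.com/Nonu-ruhrriver873/DUDA | scripts/trust.py | estimate_recovery
-- ===== SOURCE A (Python) =====
-- def estimate_recovery(issues_by_axis: dict) -> list[str]:
--     """Suggest expected score gains by resolving failing items"""
--     suggestions = []
--     for axis, issues in issues_by_axis.items():
--         for issue in issues:
--             if "Run AUDIT first" in issue:
--                 suggestions.append("1. Run AUDIT -> Boundary Trust +40 pts expected")
--             elif "dynamic/runtime" in issue:
--                 suggestions.append("2. Manually verify dynamic logic -> Analysis Trust +20 pts expected")
--             elif "User approval" in issue:
--                 suggestions.append("3. Run 'duda approve' -> Map Trust +30 pts")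
--             elif "update required" in issue:
--                 suggestions.append("4. Run 'duda update' -> Map Trust recovery")
--             elif "target not specified" in issue:
--                 suggestions.append("5. Specify transplant target path -> Intent Trust +30 pts")
--     return list(dict.fromkeys(suggestions))  # Remove duplicates
-- ===== SOURCE B (Python) =====
-- KEYS = [
--     "Run AUDIT first",
--     "dynamic/runtime",
--     "User approval",
--     "update required",
--     "target not specified",
-- ]
--
-- MSGS = [
--     "1. Run AUDIT -> Boundary Trust +40 pts expected",
--     "2. Manually verify dynamic logic -> Analysis Trust +20 pts expected",
--     "3. Run 'duda approve' -> Map Trust +30 pts",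
--     "4. Run 'duda update' -> Map Trust recovery",
--     "5. Specify transplant target path -> Intent Trust +30 pts",
-- ]
--
--
-- def _first_match(issue):
--     for k, key in enumerate(KEYS):
--         if key in issue:
--             return k
--     return None
--
--
-- def estimate_recovery(issues_by_axis: dict) -> list[str]:
--     """Suggest expected score gains by resolving failing items"""
--     firsts = [_first_match(issue)
--               for issues in issues_by_axis.values()
--               for issue in issues]
--     entries = [(firsts.index(k), msg) for k, msg in enumerate(MSGS) if k in firsts]
--     entries.sort(key=lambda e: e[0])
--     return [msg for _, msg in entries]
-- ===== Notes on version B (the rewrite author's own statement) =====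
-- stated objective: alternative
-- what changed: Instead of A's collect-then-dedup (append a suggestion per issue, then dict.fromkeys), B computes each issue's first-match pattern index once, selects per pattern the position of its earliest first-match, sorts the present patterns by that position and emits their messages, so duplicates never arise and no dedup pass exists.
import Mathlib
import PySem

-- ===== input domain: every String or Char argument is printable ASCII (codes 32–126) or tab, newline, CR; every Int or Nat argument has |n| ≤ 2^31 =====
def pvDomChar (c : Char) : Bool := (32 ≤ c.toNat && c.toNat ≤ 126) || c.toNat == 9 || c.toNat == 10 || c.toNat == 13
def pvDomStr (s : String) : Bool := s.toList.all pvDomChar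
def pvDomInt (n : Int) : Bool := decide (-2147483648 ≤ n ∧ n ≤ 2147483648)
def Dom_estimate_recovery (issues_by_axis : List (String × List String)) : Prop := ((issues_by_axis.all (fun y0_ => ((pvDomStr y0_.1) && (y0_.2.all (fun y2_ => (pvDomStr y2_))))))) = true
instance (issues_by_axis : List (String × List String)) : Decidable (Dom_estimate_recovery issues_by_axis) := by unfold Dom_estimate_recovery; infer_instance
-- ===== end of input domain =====

-- B replaces A's collect-then-dedup (elif cascade appending, then dict.fromkeys) by a different
-- algorithm: per pattern, find the earliest issue whose first match is that pattern, then sort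
-- the present patterns by that position; same asymptotic cost ('alternative').

-- ===== PORT A =====
-- literal transliteration: nested loops with an elif cascade appending to `suggestions`,
-- then list(dict.fromkeys(...)) = PySem.List.dedup
def estimate_recovery (issues_by_axis : List (String × List String)) : List String :=
  let suggestions :=
    issues_by_axis.foldl (fun acc ax =>
      ax.2.foldl (fun acc issue =>
        if PySem.Str.isIn "Run AUDIT first" issue then
          acc ++ ["1. Run AUDIT -> Boundary Trust +40 pts expected"]
        else if PySem.Str.isIn "dynamic/runtime" issue then
          acc ++ ["2. Manually verify dynamic logic -> Analysis Trust +20 pts expected"]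
        else if PySem.Str.isIn "User approval" issue then
          acc ++ ["3. Run 'duda approve' -> Map Trust +30 pts"]
        else if PySem.Str.isIn "update required" issue then
          acc ++ ["4. Run 'duda update' -> Map Trust recovery"]
        else if PySem.Str.isIn "target not specified" issue then
          acc ++ ["5. Specify transplant target path -> Intent Trust +30 pts"]
        else acc) acc) []
  PySem.List.dedup suggestions

-- ===== PORT B =====
def pvKeys : List String :=
  ["Run AUDIT first", "dynamic/runtime", "User approval", "update required", "target not specified"]

def pvMsgs : List String :=
  ["1. Run AUDIT -> Boundary Trust +40 pts expected",
   "2. Manually verify dynamic logic -> Analysis Trust +20 pts expected",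
   "3. Run 'duda approve' -> Map Trust +30 pts",
   "4. Run 'duda update' -> Map Trust recovery",
   "5. Specify transplant target path -> Intent Trust +30 pts"]

-- Source B's _first_match: index of the first key contained in `issue`, else None
def pvFirstMatch (issue : String) : Option Int :=
  (PySem.List.enumerate pvKeys 0).findSome?
    (fun p => if PySem.Str.isIn p.2 issue then some p.1 else none)

def estimate_recovery_alt (issues_by_axis : List (String × List String)) : List String :=
  let firsts := (issues_by_axis.flatMap (fun ax => ax.2)).map pvFirstMatch
  let entries := (PySem.List.enumerate pvMsgs 0).flatMap (fun p =>
    if some p.1 ∈ firsts then [((PySem.List.index? firsts (some p.1)).getD 0, p.2)] else [])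
  (PySem.List.sorted entries (fun e => e.1) false).map (fun e => e.2)

-- ===== PRECONDITION & SPEC =====
def Spec_estimate_recovery (issues_by_axis : List (String × List String)) (out : List String) : Prop := out = estimate_recovery_alt issues_by_axis
instance (issues_by_axis : List (String × List String)) (out : List String) : Decidable (Spec_estimate_recovery issues_by_axis out) := by unfold Spec_estimate_recovery; infer_instance

-- ===== CLAIM (what is proved, stated in full; the proofs are below) =====
def Claim_equal_estimate_recovery : Prop := ∀ (issues_by_axis : List (String × List String)), Dom_estimate_recovery issues_by_axis → Spec_estimate_recovery issues_by_axis (estimate_recovery issues_by_axis)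

-- ===== LEMMAS AND PROOFS =====

-- the message paired with pattern k
def pvMsgAt (k : Int) : String := pvMsgs.getD k.toNat ""

-- one issue's contribution on A's side, written through B's pvFirstMatch
def pvPhi (o : Option Int) : List String :=
  match o with
  | some k => [pvMsgAt k]
  | none => []

-- rank of pattern k: position of its earliest first-match in `firsts`
def pvRk (fs : List (Option Int)) (k : Int) : Nat := (PySem.List.index? fs (some k)).getD 0

-- A's per-issue cascade step appends exactly pvPhi of B's first-match
theorem pv_step_eq (acc : List String) (issue : String) :
    (if PySem.Str.isIn "Run AUDIT first" issue then
       acc ++ ["1. Run AUDIT -> Boundary Trust +40 pts expected"]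
     else if PySem.Str.isIn "dynamic/runtime" issue then
       acc ++ ["2. Manually verify dynamic logic -> Analysis Trust +20 pts expected"]
     else if PySem.Str.isIn "User approval" issue then
       acc ++ ["3. Run 'duda approve' -> Map Trust +30 pts"]
     else if PySem.Str.isIn "update required" issue then
       acc ++ ["4. Run 'duda update' -> Map Trust recovery"]
     else if PySem.Str.isIn "target not specified" issue then
       acc ++ ["5. Specify transplant target path -> Intent Trust +30 pts"]
     else acc) = acc ++ pvPhi (pvFirstMatch issue) := by
  simp only [pvPhi, pvMsgAt, pvFirstMatch, pvKeys, pvMsgs, PySem.List.enumerate_cons,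
    PySem.List.enumerate_nil, List.findSome?]
  split_ifs <;> simp

-- A's inner loop over one axis's issues
theorem pv_inner_eq (issues : List String) (acc : List String) :
    issues.foldl (fun acc issue =>
        if PySem.Str.isIn "Run AUDIT first" issue then
          acc ++ ["1. Run AUDIT -> Boundary Trust +40 pts expected"]
        else if PySem.Str.isIn "dynamic/runtime" issue then
          acc ++ ["2. Manually verify dynamic logic -> Analysis Trust +20 pts expected"]
        else if PySem.Str.isIn "User approval" issue then
          acc ++ ["3. Run 'duda approve' -> Map Trust +30 pts"]
        else if PySem.Str.isIn "update required" issue then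
          acc ++ ["4. Run 'duda update' -> Map Trust recovery"]
        else if PySem.Str.isIn "target not specified" issue then
          acc ++ ["5. Specify transplant target path -> Intent Trust +30 pts"]
        else acc) acc
      = acc ++ issues.flatMap (fun issue => pvPhi (pvFirstMatch issue)) := by
  induction issues generalizing acc with
  | nil => simp
  | cons i is ih =>
    rw [List.foldl_cons, pv_step_eq, ih, List.flatMap_cons, List.append_assoc]

-- A's outer loop over axes
theorem pv_outer_eq (axs : List (String × List String)) (acc : List String) :
    axs.foldl (fun acc ax =>
      ax.2.foldl (fun acc issue =>
        if PySem.Str.isIn "Run AUDIT first" issue then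
          acc ++ ["1. Run AUDIT -> Boundary Trust +40 pts expected"]
        else if PySem.Str.isIn "dynamic/runtime" issue then
          acc ++ ["2. Manually verify dynamic logic -> Analysis Trust +20 pts expected"]
        else if PySem.Str.isIn "User approval" issue then
          acc ++ ["3. Run 'duda approve' -> Map Trust +30 pts"]
        else if PySem.Str.isIn "update required" issue then
          acc ++ ["4. Run 'duda update' -> Map Trust recovery"]
        else if PySem.Str.isIn "target not specified" issue then
          acc ++ ["5. Specify transplant target path -> Intent Trust +30 pts"]
        else acc) acc) acc
    = acc ++ (axs.flatMap (fun ax => ax.2)).flatMap (fun issue => pvPhi (pvFirstMatch issue)) := by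
  induction axs generalizing acc with
  | nil => simp
  | cons ax axs ih =>
    rw [List.foldl_cons, pv_inner_eq, ih, List.flatMap_cons, List.flatMap_append,
      List.append_assoc]

-- pvFirstMatch only produces indices 0..4
theorem pvFirstMatch_range (issue : String) (k : Int) (h : pvFirstMatch issue = some k) :
    0 ≤ k ∧ k < 5 := by
  simp only [pvFirstMatch, pvKeys, PySem.List.enumerate_cons, PySem.List.enumerate_nil,
    List.findSome?] at h
  split_ifs at h <;> simp_all <;> omega

-- flatMap of pvPhi = the matched indices, mapped to their messages
theorem pv_flatMap_phi (fs : List (Option Int)) :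
    fs.flatMap pvPhi = (fs.filterMap id).map pvMsgAt := by
  induction fs with
  | nil => rfl
  | cons o fs ih => cases o <;> simp [pvPhi, ih]

-- rank of pattern k, cons laws
theorem pv_rk_cons_ne (o : Option Int) (fs : List (Option Int)) (k : Int)
    (hne : o ≠ some k) (h : some k ∈ fs) : pvRk (o :: fs) k = pvRk fs k + 1 := by
  have hs : (PySem.List.index? fs (some k)).isSome := by
    rw [PySem.List.index?_isSome_iff]; exact h
  obtain ⟨n, hn⟩ := Option.isSome_iff_exists.mp hs
  simp only [pvRk]
  rw [PySem.List.index?_cons_of_ne fs hne, hn]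
  rfl

theorem pv_rk_cons_self (fs : List (Option Int)) (k : Int) : pvRk (some k :: fs) k = 0 := by
  simp only [pvRk]
  rw [PySem.List.index?_cons_self]
  rfl

-- dedup commutes with a map injective on the list's elements
theorem pv_dedup_map (f : Int → String) (l : List Int)
    (hinj : ∀ a ∈ l, ∀ b ∈ l, f a = f b → a = b) :
    PySem.List.dedup (l.map f) = (PySem.List.dedup l).map f := by
  induction l with
  | nil => rfl
  | cons x xs ih =>
    have hx : x ∈ x :: xs := List.mem_cons_self
    have ih' := ih (fun a ha b hb => hinj a (List.mem_cons_of_mem _ ha) b (List.mem_cons_of_mem _ hb))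
    simp only [List.map_cons, PySem.List.dedup_eq_ofList, PySem.Set.ofList_cons] at *
    rw [ih']
    simp only [PySem.Set.discard, List.filter_map, List.cons.injEq, true_and]
    congr 1
    apply List.filter_congr
    intro a ha
    have ha' : a ∈ xs := by
      have := PySem.Set.mem_ofList (xs := xs) (y := a); simp_all
    simp only [Function.comp]
    by_cases h : a = x
    · simp [h]
    · have : f a ≠ f x := fun hfe => h (hinj a (List.mem_cons_of_mem _ ha') x hx hfe)
      simp [h, this]

-- the dedup of the matched indices is strictly increasing in pvRk
theorem pv_pairwise_rk (fs : List (Option Int)) :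
    (PySem.List.dedup (fs.filterMap id)).Pairwise (fun a b => pvRk fs a < pvRk fs b) := by
  induction fs with
  | nil => exact List.Pairwise.nil
  | cons o fs ih =>
    have hmem : ∀ a : Int, a ∈ PySem.List.dedup (fs.filterMap id) → some a ∈ fs := by
      intro a ha
      rw [PySem.List.dedup_eq_ofList, PySem.Set.mem_ofList] at ha
      simpa using List.mem_filterMap.mp ha
    cases o with
    | none =>
      rw [show (none :: fs).filterMap id = fs.filterMap id from rfl]
      refine ih.imp_of_mem ?_
      intro a b ha hb hab
      rw [pv_rk_cons_ne _ _ _ (by simp) (hmem a ha), pv_rk_cons_ne _ _ _ (by simp) (hmem b hb)]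
      omega
    | some x =>
      rw [show (some x :: fs).filterMap id = x :: fs.filterMap id from rfl,
        PySem.List.dedup_eq_ofList, PySem.Set.ofList_cons]
      have hdm : ∀ b : Int, b ∈ (PySem.Set.ofList (fs.filterMap id)).discard x →
          b ≠ x ∧ some b ∈ fs := by
        intro b hb
        simp only [PySem.Set.discard, List.mem_filter] at hb
        exact ⟨by simpa using hb.2, hmem b (by rw [PySem.List.dedup_eq_ofList]; exact hb.1)⟩
      constructor
      · intro b hb
        obtain ⟨hbx, hbf⟩ := hdm b hb
        rw [pv_rk_cons_self, pv_rk_cons_ne _ _ _ (by simp [hbx.symm]) hbf]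
        omega
      · have hsub : ((PySem.Set.ofList (fs.filterMap id)).discard x).Sublist
            (PySem.Set.ofList (fs.filterMap id)) := List.filter_sublist
        have ih' : ((PySem.Set.ofList (fs.filterMap id)).discard x).Pairwise
            (fun a b => pvRk fs a < pvRk fs b) := by
          rw [PySem.List.dedup_eq_ofList] at ih
          exact List.Pairwise.sublist hsub ih
        refine ih'.imp_of_mem ?_
        intro a b ha hb hab
        obtain ⟨hax, haf⟩ := hdm a ha
        obtain ⟨hbx, hbf⟩ := hdm b hb
        rw [pv_rk_cons_ne _ _ _ (by simp [hax.symm]) haf,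
          pv_rk_cons_ne _ _ _ (by simp [hbx.symm]) hbf]
        omega

set_option maxHeartbeats 1000000 in
-- B's entry comprehension, as a filtered index list mapped through (pvRk, pvMsgAt)
theorem pv_entries_eq (fs : List (Option Int)) :
    (PySem.List.enumerate pvMsgs 0).flatMap (fun p =>
        if some p.1 ∈ fs then [((PySem.List.index? fs (some p.1)).getD 0, p.2)] else [])
      = (([0, 1, 2, 3, 4] : List Int).filter (fun k => decide (some k ∈ fs))).map
          (fun k => (pvRk fs k, pvMsgAt k)) := by
  simp only [pvMsgs, PySem.List.enumerate_cons, PySem.List.enumerate_nil, List.flatMap_cons,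
    List.flatMap_nil, List.filter_cons, List.filter_nil, pvRk, pvMsgAt, decide_eq_true_eq]
  norm_num
  split_ifs <;> rfl

-- ===== VERDICT (by name: the statement is the Claim_ definition above) =====
set_option maxHeartbeats 1000000 in
theorem estimate_recovery_spec : Claim_equal_estimate_recovery := by
  intro xs _
  show estimate_recovery xs = estimate_recovery_alt xs
  unfold estimate_recovery estimate_recovery_alt
  rw [pv_outer_eq]
  simp only [List.nil_append]
  have hfm : ∀ k : Int, some k ∈ (xs.flatMap (fun ax => ax.2)).map pvFirstMatch →
      0 ≤ k ∧ k < 5 := by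
    intro k hk
    obtain ⟨issue, _, hi⟩ := List.mem_map.mp hk
    exact pvFirstMatch_range issue k hi
  set fs := (xs.flatMap (fun ax => ax.2)).map pvFirstMatch with hfs
  set ks := fs.filterMap id with hks
  have hmem_ks : ∀ k : Int, k ∈ ks → 0 ≤ k ∧ k < 5 := by
    intro k hk
    exact hfm k (by simpa using List.mem_filterMap.mp hk)
  -- A's side: dedup of the messages of the matched indices
  have hA : PySem.List.dedup
      ((xs.flatMap (fun ax => ax.2)).flatMap (fun issue => pvPhi (pvFirstMatch issue)))
      = (PySem.List.dedup ks).map pvMsgAt := by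
    have h1 : (xs.flatMap (fun ax => ax.2)).flatMap (fun issue => pvPhi (pvFirstMatch issue))
        = fs.flatMap pvPhi := by
      rw [hfs, List.flatMap_map]
    rw [h1, pv_flatMap_phi, ← hks]
    apply pv_dedup_map
    intro a ha b hb hab
    obtain ⟨ha0, ha5⟩ := hmem_ks a ha
    obtain ⟨hb0, hb5⟩ := hmem_ks b hb
    interval_cases a <;> interval_cases b <;> first | rfl | (exfalso; revert hab; decide)
  -- B's side: the sorted entries are exactly dedup ks mapped through (pvRk, pvMsgAt)
  have hperm : ((PySem.List.dedup ks).map (fun k => (pvRk fs k, pvMsgAt k))).Perm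
      ((([0, 1, 2, 3, 4] : List Int).filter (fun k => decide (some k ∈ fs))).map
        (fun k => (pvRk fs k, pvMsgAt k))) := by
    apply List.Perm.map
    rw [List.perm_ext_iff_of_nodup (PySem.List.nodup_dedup ks)
      (List.Nodup.filter _ (by decide))]
    intro a
    constructor
    · intro ha
      have ha' : a ∈ ks := (PySem.List.mem_dedup _ _).mp ha
      have hr := hmem_ks a ha'
      have hin : some a ∈ fs := by simpa using List.mem_filterMap.mp ha'
      have : a = 0 ∨ a = 1 ∨ a = 2 ∨ a = 3 ∨ a = 4 := by omega
      simp only [List.mem_filter, decide_eq_true_eq]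
      exact ⟨by rcases this with h|h|h|h|h <;> simp [h], hin⟩
    · intro ha
      have hin : some a ∈ fs := by
        simp only [List.mem_filter, decide_eq_true_eq] at ha
        exact ha.2
      rw [PySem.List.mem_dedup _ _, hks]
      exact List.mem_filterMap.mpr ⟨some a, hin, rfl⟩
  have hsorted : PySem.List.sorted
      ((PySem.List.enumerate pvMsgs 0).flatMap (fun p =>
        if some p.1 ∈ fs then [((PySem.List.index? fs (some p.1)).getD 0, p.2)] else []))
      (fun e => e.1) false
      = (PySem.List.dedup ks).map (fun k => (pvRk fs k, pvMsgAt k)) := by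
    rw [pv_entries_eq fs]
    apply PySem.List.sorted_eq_of_perm_of_pairwise_lt _ _ _ hperm
    rw [List.pairwise_map]
    exact pv_pairwise_rk fs
  rw [hA, hsorted, List.map_map]
  rfl
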